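-- pv_equiv track=rewrite | github.com/JunOnJuly/BaekJoon | 백준/Gold/17386. 선분 교차 1/선분 교차 1.py | CCW
-- ===== SOURCE A (Python) =====
-- def CCW(line, point):
--     # x, y 리스트
--     x_list = []
--     y_list = []
--     for i in range(0, 4, 2):
--         x_list.append(line[i])
--         y_list.append(line[i+1])
--     x_list.append(point[0])
--     y_list.append(point[1])
--     x_list.append(line[0])
--     y_list.append(line[1])
--     # 합
--     ccw_sum = 0
--     for idx in range(3):
--         ccw_sum += x_list[idx]*y_list[idx+1]
--         ccw_sum -= y_list[idx]*x_list[idx+1]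
--     return ccw_sum
-- ===== SOURCE B (Python) =====
-- def CCW(line, point):
--     x0, y0, x1, y1 = line[0], line[1], line[2], line[3]
--     px, py = point[0], point[1]
--     return (x0 * y1 - y0 * x1) + (x1 * py - y1 * px) + (px * y0 - py * x0)
-- ===== Notes on version B (the rewrite author's own statement) =====
-- stated objective: simpler
-- what changed: Replaces the list-building and shoelace loop with a direct closed-form sum of the three signed cross terms of the triangle (P0,P1,P2).
import Mathlib
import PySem

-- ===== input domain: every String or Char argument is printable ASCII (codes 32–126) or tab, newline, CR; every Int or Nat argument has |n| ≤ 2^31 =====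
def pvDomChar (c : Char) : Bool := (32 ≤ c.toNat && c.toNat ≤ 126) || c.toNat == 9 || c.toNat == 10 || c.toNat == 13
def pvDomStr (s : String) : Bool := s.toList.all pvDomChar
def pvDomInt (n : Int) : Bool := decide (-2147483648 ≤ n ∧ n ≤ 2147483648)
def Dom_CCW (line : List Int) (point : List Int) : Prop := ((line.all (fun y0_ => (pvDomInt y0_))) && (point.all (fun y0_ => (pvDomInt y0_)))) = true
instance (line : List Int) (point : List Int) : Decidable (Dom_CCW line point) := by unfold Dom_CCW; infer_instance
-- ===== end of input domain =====

-- B replaces A's list building and shoelace loop by the direct closed-form cross-term sum (simpler).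


-- ===== PORT A =====
-- g xs i = xs[i]; inside Pre_CCW every index is in range, so the .getD 0 default is never used.
def pvGetA (xs : List Int) (i : Int) : Int := (PySem.List.pyGet? xs i).getD 0

def CCW (line : List Int) (point : List Int) : Int :=
  -- for i in range(0, 4, 2): x_list.append(line[i]); y_list.append(line[i+1])
  let xy := (PySem.List.pyRange 0 4 2).foldl
    (fun (p : List Int × List Int) i => (p.1 ++ [pvGetA line i], p.2 ++ [pvGetA line (i+1)])) ([], [])
  let x_list := xy.1 ++ [pvGetA point 0] ++ [pvGetA line 0]
  let y_list := xy.2 ++ [pvGetA point 1] ++ [pvGetA line 1]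
  -- for idx in range(3): ccw_sum += x[idx]*y[idx+1]; ccw_sum -= y[idx]*x[idx+1]
  (PySem.List.pyRange 0 3 1).foldl
    (fun s idx => s + pvGetA x_list idx * pvGetA y_list (idx+1)
                    - pvGetA y_list idx * pvGetA x_list (idx+1)) 0

-- ===== PORT B =====
def CCW_alt (line : List Int) (point : List Int) : Int :=
  let x0 := pvGetA line 0
  let y0 := pvGetA line 1
  let x1 := pvGetA line 2
  let y1 := pvGetA line 3
  let px := pvGetA point 0
  let py := pvGetA point 1
  (x0 * y1 - y0 * x1) + (x1 * py - y1 * px) + (px * y0 - py * x0)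

-- ===== PRECONDITION & SPEC =====
-- Pre_ excludes exactly the inputs where Python A raises IndexError (line shorter than 4 or point shorter than 2).
def Pre_CCW (line : List Int) (point : List Int) : Prop := 4 ≤ line.length ∧ 2 ≤ point.length
instance (line : List Int) (point : List Int) : Decidable (Pre_CCW line point) := by unfold Pre_CCW; infer_instance
def pvWitness_CCW : List Int × List Int := ([1, 2, 3, 4], [5, 6])

def Spec_CCW (line : List Int) (point : List Int) (out : Int) : Prop := out = CCW_alt line point
instance (line : List Int) (point : List Int) (out : Int) : Decidable (Spec_CCW line point out) := by unfold Spec_CCW; infer_instance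

-- ===== CLAIM (what is proved, stated in full; the proofs are below) =====
def Claim_equal_CCW : Prop := ∀ (line : List Int) (point : List Int), Dom_CCW line point → Pre_CCW line point → Spec_CCW line point (CCW line point)

-- ===== LEMMAS AND PROOFS =====

-- ===== VERDICT (by name: the statement is the Claim_ definition above) =====
theorem CCW_spec : Claim_equal_CCW := by
  intro line point _ hpre
  obtain ⟨hl, hp⟩ := hpre
  show CCW _ _ = CCW_alt _ _
  rcases line with _ | ⟨a, _ | ⟨b, _ | ⟨c, _ | ⟨d, rest⟩⟩⟩⟩ <;>
    rcases point with _ | ⟨p, _ | ⟨q, rest2⟩⟩ <;>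
    simp at hl hp <;>
    · simp [CCW, CCW_alt, pvGetA, PySem.List.pyGet?, PySem.List.pyIdx?, PySem.List.pyRange,
        List.range, List.range.loop]
      split_ifs <;> first | omega | (simp; ring)
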